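-- pv_equiv track=rewrite | github.com/SophieToescher/pto20 | Python6_Woerterbuch_Erweiterung_Funktionen_Toescher.py | sucheWort
-- ===== SOURCE A (Python) =====
-- woerterbuch_deutsch = ["Apfel", "Birne", "Kirsche", "Melone", "Marille", "Pfirsich"]
--
-- woerterbuch_english = ["apple", "pear", "cherry", "melon", "apricot", "peach"]
--
-- def sucheWort(Input): #Unterfunktion für die Suche eines Worts im WB
--     index = 0
--     for wort in woerterbuch_deutsch:
--         if Input.lower() == wort.lower():
--             break
--         index +=1
--
--     if index == len(woerterbuch_deutsch):
--         index = 0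
--         for wort in woerterbuch_english:
--             if Input.lower() == wort.lower():
--                 break
--             index +=1
--
--         if index == len(woerterbuch_english):
--             raise Exception("Das Wort steht nicht im Wörterbuch")    # Sonst -> Ausgabe "Das Wort steht nicht im Wörterbuch"
--     return (woerterbuch_deutsch[index], woerterbuch_english[index], index)
-- ===== SOURCE B (Python) =====
-- woerterbuch_deutsch = ["Apfel", "Birne", "Kirsche", "Melone", "Marille", "Pfirsich"]
--
-- woerterbuch_english = ["apple", "pear", "cherry", "melon", "apricot", "peach"]
--
-- # table built once: lowercased word -> index (English entries first so German
-- # entries would win on a clash; the lowered lists are disjoint here anyway)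
-- _table = {}
-- for _i, _w in enumerate(woerterbuch_english):
--     _table[_w.lower()] = _i
-- for _i, _w in enumerate(woerterbuch_deutsch):
--     _table[_w.lower()] = _i
--
-- def sucheWort(Input):
--     idx = _table.get(Input.lower())
--     if idx is None:
--         raise Exception("Das Wort steht nicht im Wörterbuch")
--     return (woerterbuch_deutsch[idx], woerterbuch_english[idx], idx)
-- ===== Notes on version B (the rewrite author's own statement) =====
-- stated objective: simpler
-- what changed: Replaces A's two sequential indexed linear scans over the German and English lists by a lowercase-word-to-index dict built once at module load and a single table lookup.
import Mathlib
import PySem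

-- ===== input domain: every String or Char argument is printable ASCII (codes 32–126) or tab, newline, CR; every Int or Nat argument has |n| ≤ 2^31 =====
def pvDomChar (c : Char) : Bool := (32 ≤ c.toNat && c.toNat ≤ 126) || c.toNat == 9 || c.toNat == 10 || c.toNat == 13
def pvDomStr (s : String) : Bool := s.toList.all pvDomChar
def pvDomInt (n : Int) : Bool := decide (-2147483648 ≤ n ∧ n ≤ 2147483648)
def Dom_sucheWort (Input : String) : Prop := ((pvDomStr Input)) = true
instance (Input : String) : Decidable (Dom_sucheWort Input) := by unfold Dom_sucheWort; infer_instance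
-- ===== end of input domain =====

-- B replaces A's two sequential indexed scans with a lowered-word → index table built once plus a single lookup (simpler per-call logic).


def woerterbuchDeutsch : List String := ["Apfel", "Birne", "Kirsche", "Melone", "Marille", "Pfirsich"]
def woerterbuchEnglish : List String := ["apple", "pear", "cherry", "melon", "apricot", "peach"]

-- ===== PORT A =====
-- A's 'for wort in list: if Input.lower() == wort.lower(): break / index += 1' loop
def scanIdx (s : String) (ws : List String) (i : Int) : Int :=
  match ws with
  | [] => i
  | w :: rest => if s == PySem.Str.lower w then i else scanIdx s rest (i + 1)

def sucheWort (Input : String) : String × String × Int :=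
  let i := scanIdx (PySem.Str.lower Input) woerterbuchDeutsch 0
  if i = (woerterbuchDeutsch.length : Int) then
    let j := scanIdx (PySem.Str.lower Input) woerterbuchEnglish 0
    -- j = len(english) means Python raises Exception; excluded by Pre_sucheWort
    (PySem.List.pyGetD woerterbuchDeutsch j "", PySem.List.pyGetD woerterbuchEnglish j "", j)
  else
    (PySem.List.pyGetD woerterbuchDeutsch i "", PySem.List.pyGetD woerterbuchEnglish i "", i)

-- ===== PORT B =====
-- the module-level table: lowered word -> index, English entries inserted first, then German
def wortTable : PySem.Dict String Int :=
  let t := (PySem.List.enumerate woerterbuchEnglish).foldl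
    (fun d p => d.insert (PySem.Str.lower p.2) p.1) PySem.Dict.empty
  (PySem.List.enumerate woerterbuchDeutsch).foldl
    (fun d p => d.insert (PySem.Str.lower p.2) p.1) t

def sucheWort_alt (Input : String) : String × String × Int :=
  match wortTable.get? (PySem.Str.lower Input) with
  | some idx => (PySem.List.pyGetD woerterbuchDeutsch idx "", PySem.List.pyGetD woerterbuchEnglish idx "", idx)
  | none => ("", "", 0)  -- Python raises Exception here; excluded by Pre_sucheWort

-- ===== PRECONDITION & SPEC =====
-- Pre_ excludes exactly the inputs on which A (and B) raise Exception("Das Wort steht nicht im Wörterbuch"):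
-- those whose lowercase is in neither word list.
def Pre_sucheWort (Input : String) : Prop :=
  PySem.Str.lower Input ∈ (["apfel", "birne", "kirsche", "melone", "marille", "pfirsich",
                            "apple", "pear", "cherry", "melon", "apricot", "peach"] : List String)
instance (Input : String) : Decidable (Pre_sucheWort Input) := by unfold Pre_sucheWort; infer_instance
def pvWitness_sucheWort : String := "Apfel"

def Spec_sucheWort (Input : String) (out : String × String × Int) : Prop := out = sucheWort_alt Input
instance (Input : String) (out : String × String × Int) : Decidable (Spec_sucheWort Input out) := by unfold Spec_sucheWort; infer_instance

-- ===== CLAIM (what is proved, stated in full; the proofs are below) =====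
def Claim_equal_sucheWort : Prop := ∀ (Input : String), Dom_sucheWort Input → Pre_sucheWort Input → Spec_sucheWort Input (sucheWort Input)

-- ===== LEMMAS AND PROOFS =====

-- ===== VERDICT (by name: the statement is the Claim_ definition above) =====
theorem sucheWort_spec : Claim_equal_sucheWort := by
  intro Input _ hPre
  unfold Pre_sucheWort at hPre
  simp only [List.mem_cons, List.not_mem_nil, or_false] at hPre
  unfold Spec_sucheWort sucheWort sucheWort_alt
  rcases hPre with h | h | h | h | h | h | h | h | h | h | h | h <;> rw [h] <;> decide
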